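-- pv_equiv track=rewrite | github.com/JoonseoKang/coding_test | 프로그래머스/lv2/87390. n＾2 배열 자르기/n＾2 배열 자르기.py | solution
-- ===== SOURCE A (Python) =====
-- def solution(n, left, right):
--     tmp = []
--     num = 0
--     for i in range(left - left%n, n**2):
--         if i > right:
--             break
--
--         if i//n == 0:
--             tmp.append(i+1)
--
--         elif i//n == n-1:
--             tmp.append(n)
--
--         else:
--             num = max(num, (i // n) + 1)
--             if i%n > i // n:
--                 num += 1
--                 tmp.append(num)
--             else:
--                 num = (i // n) + 1
--                 tmp.append(num)
--
--     return tmp[left%n:]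
-- ===== SOURCE B (Python) =====
-- def solution(n, left, right):
--     return [max(i // n, i % n) + 1 for i in range(left, right + 1) if i < n ** 2]
-- ===== Notes on version B (the rewrite author's own statement) =====
-- stated objective: simpler
-- what changed: Replaces A's stateful accumulator loop (running num, first/middle/last-row branches, row-aligned start and a final tmp[left%n:] trim) with a stateless closed-form comprehension value(i)=max(i//n,i%n)+1 over range(left,right+1).
-- outside the precondition, e.g. on solution(1, -15, -14): A returns [1, 2], B returns [1, 1]; on solution(-5, 2, 8): A returns [-1, -1, -1], B returns [0, 0, 0, 1, -1, -1, -1]; on solution(0, 1, 2): A raises ZeroDivisionError, B returns []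
import Mathlib
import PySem

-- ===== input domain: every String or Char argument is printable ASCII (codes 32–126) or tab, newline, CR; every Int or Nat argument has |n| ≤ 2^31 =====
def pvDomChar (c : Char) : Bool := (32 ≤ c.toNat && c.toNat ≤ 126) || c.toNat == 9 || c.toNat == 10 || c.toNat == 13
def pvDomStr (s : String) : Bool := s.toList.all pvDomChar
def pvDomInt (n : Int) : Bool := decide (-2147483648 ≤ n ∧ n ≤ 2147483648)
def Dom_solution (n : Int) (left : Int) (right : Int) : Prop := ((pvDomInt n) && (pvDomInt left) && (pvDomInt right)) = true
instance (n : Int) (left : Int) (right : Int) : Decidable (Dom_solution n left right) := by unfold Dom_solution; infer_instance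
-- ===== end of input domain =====

-- B replaces A's stateful accumulator loop by a stateless closed-form map max(i//n,i%n)+1 over range(left,right+1) (simpler decomposition, same cost).

-- ===== PORT A =====
-- A's 'for i in range(left - left%n, n**2)' loop with its break, the running num and the tmp
-- accumulator, as recursion on the loop index i (Python's range is lazy; i steps by 1 up to n**2)
def solutionLoop (n : Int) (right : Int) (i : Int) (tmp : List Int) (num : Int) : List Int :=
  if _hi : i < n ^ 2 then
    if i > right then tmp
    else if PySem.Int.floordiv i n = 0 then
      solutionLoop n right (i + 1) (tmp ++ [i + 1]) num
    else if PySem.Int.floordiv i n = n - 1 then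
      solutionLoop n right (i + 1) (tmp ++ [n]) num
    else
      let num1 := max num (PySem.Int.floordiv i n + 1)
      if PySem.Int.mod i n > PySem.Int.floordiv i n then
        solutionLoop n right (i + 1) (tmp ++ [num1 + 1]) (num1 + 1)
      else
        solutionLoop n right (i + 1) (tmp ++ [PySem.Int.floordiv i n + 1]) (PySem.Int.floordiv i n + 1)
  else tmp
termination_by (n ^ 2 - i).toNat
decreasing_by all_goals omega

def solution (n : Int) (left : Int) (right : Int) : List Int :=
  PySem.List.slice
    (solutionLoop n right (left - PySem.Int.mod left n) [] 0)
    (some (PySem.Int.mod left n)) none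

-- ===== PORT B =====
-- the comprehension [max(i // n, i % n) + 1 for i in range(left, right + 1) if i < n ** 2]
def solution_alt (n : Int) (left : Int) (right : Int) : List Int :=
  ((PySem.List.pyRange left (right + 1) 1).filter (fun i => decide (i < n ^ 2))).map
    (fun i => max (PySem.Int.floordiv i n) (PySem.Int.mod i n) + 1)

-- ===== PRECONDITION & SPEC =====
-- Pre_ restricts to the problem's natural domain (1 ≤ n, 0 ≤ left; right unconstrained). Excluded: n = 0,
-- where A raises ZeroDivisionError; and n < 0 or left < 0, where A's row-aligned start and negative-index
-- slice trim produce accidental values of its accumulator machinery that no caller of this n²-array task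
-- would specify.
def Pre_solution (n : Int) (left : Int) (right : Int) : Prop := 1 ≤ n ∧ 0 ≤ left
instance (n : Int) (left : Int) (right : Int) : Decidable (Pre_solution n left right) := by
  unfold Pre_solution; infer_instance

def pvWitness_solution : Int × Int × Int := (3, 2, 5)

def Spec_solution (n : Int) (left : Int) (right : Int) (out : List Int) : Prop := out = solution_alt n left right
instance (n : Int) (left : Int) (right : Int) (out : List Int) : Decidable (Spec_solution n left right out) := by unfold Spec_solution; infer_instance

-- ===== CLAIM (what is proved, stated in full; the proofs are below) =====
def Claim_equal_solution : Prop := ∀ (n : Int) (left : Int) (right : Int), Dom_solution n left right → Pre_solution n left right → Spec_solution n left right (solution n left right)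

-- ===== LEMMAS AND PROOFS =====

-- ediv/emod of a decomposed index n*r + c (positive divisor)
lemma divmod_char (n r c : Int) (hn : 0 < n) (hc0 : 0 ≤ c) (hcn : c < n) :
    (n * r + c) / n = r ∧ (n * r + c) % n = c := by
  constructor
  · rw [add_comm, Int.add_mul_ediv_left c r (by omega : n ≠ 0), Int.ediv_eq_zero_of_lt hc0 hcn]
    omega
  · rw [add_comm, Int.add_mul_emod_self_left, Int.emod_eq_of_lt hc0 hcn]

-- how row/column of a flat index evolve from j to j+1
lemma succ_char (n j : Int) (hn : 0 < n) :
    ((j+1)/n = j/n ∧ (j+1)%n = j%n + 1 ∧ j%n + 1 < n) ∨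
    ((j+1)/n = j/n + 1 ∧ (j+1)%n = 0 ∧ j%n = n - 1) := by
  have hdm := Int.mul_ediv_add_emod j n
  have hc0 : 0 ≤ j % n := Int.emod_nonneg j (by omega)
  have hcn : j % n < n := Int.emod_lt_of_pos j hn
  by_cases hc : j % n + 1 < n
  · left
    have h := divmod_char n (j/n) (j%n+1) hn (by omega) hc
    have he : n * (j/n) + (j%n+1) = j+1 := by linarith
    rw [he] at h
    exact ⟨h.1, h.2, hc⟩
  · right
    have hceq : j % n = n - 1 := by omega
    have h := divmod_char n (j/n + 1) 0 hn le_rfl hn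
    have he : n * (j/n + 1) + 0 = j + 1 := by
      have : n * (j/n + 1) = n * (j/n) + n := by ring
      omega
    rw [he] at h
    exact ⟨h.1, h.2, hceq⟩

lemma pyRange_nil (a b : Int) (h : b ≤ a) : PySem.List.pyRange a b 1 = [] := by
  simp [PySem.List.pyRange]; omega

lemma pyRange_drop (k : Nat) (a b : Int) :
    (PySem.List.pyRange a b 1).drop k = PySem.List.pyRange (a + k) b 1 := by
  induction k generalizing a with
  | zero => simp
  | succ k ih =>
    by_cases h : a < b
    · rw [PySem.List.pyRange_one_cons h]
      have : (a + 1) + (k : Int) = a + ((k : Nat) + 1 : Nat) := by push_cast; ring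
      simpa [this] using ih (a + 1)
    · rw [pyRange_nil a b (by omega), pyRange_nil _ b (by omega : b ≤ a + ((k+1 : Nat) : Int))]
      simp

-- B's comprehension filter truncates the increasing range at n²
lemma pyRange_filter_lt (a b m : Int) :
    (PySem.List.pyRange a b 1).filter (fun i => decide (i < m)) =
      PySem.List.pyRange a (min b m) 1 := by
  by_cases h : a < b
  · rw [PySem.List.pyRange_one_cons h]
    by_cases hm : a < m
    · rw [List.filter_cons_of_pos (by simpa using hm), PySem.List.pyRange_one_cons (by omega : a < min b m)]
      congr 1
      exact pyRange_filter_lt (a+1) b m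
    · rw [List.filter_cons_of_neg (by simpa using hm), pyRange_nil a (min b m) (by omega)]
      have := pyRange_filter_lt (a+1) b m
      rw [this, pyRange_nil _ _ (by omega)]
  · rw [pyRange_nil a b (by omega), pyRange_nil a (min b m) (by omega)]
    simp
termination_by (b - a).toNat
decreasing_by all_goals omega

-- A's loop emits the closed-form value max(i/n, i%n)+1 at every index; the invariant says num carries
-- the previous value exactly when i%n > i/n in a row i/n ≥ 1
lemma loop_eq (n right : Int) (hn : 0 < n) :
    ∀ (fuel : Nat) (j num : Int) (tmp : List Int), (n ^ 2 - j).toNat ≤ fuel → 0 ≤ j →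
      (j % n > j / n → 1 ≤ j / n → num = j % n) →
      solutionLoop n right j tmp num =
        tmp ++ (PySem.List.pyRange j (min (right + 1) (n ^ 2)) 1).map
          (fun i => max (i / n) (i % n) + 1) := by
  intro fuel
  induction fuel with
  | zero =>
    intro j num tmp hf hj hinv
    rw [solutionLoop, dif_neg (by omega : ¬ j < n ^ 2), pyRange_nil j _ (by omega)]
    simp
  | succ f ih =>
    intro j num tmp hf hj hinv
    by_cases hjb : j < n ^ 2
    · rw [solutionLoop, dif_pos hjb]
      simp only [PySem.Int.floordiv_eq_ediv_of_pos hn, PySem.Int.mod_eq_emod_of_pos hn]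
      have hdm := Int.mul_ediv_add_emod j n
      have hc0 : 0 ≤ j % n := Int.emod_nonneg j (by omega)
      have hcn : j % n < n := Int.emod_lt_of_pos j hn
      have hr0 : 0 ≤ j / n := Int.ediv_nonneg hj (by omega)
      have hsucc := succ_char n j hn
      by_cases hr : j > right
      · rw [if_pos hr, pyRange_nil j _ (by omega)]
        simp
      · rw [if_neg hr, PySem.List.pyRange_one_cons (by omega : j < min (right + 1) (n ^ 2)),
            List.map_cons]
        have hfuel : (n ^ 2 - (j + 1)).toNat ≤ f := by omega
        by_cases h0 : j / n = 0
        · rw [if_pos h0]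
          have hinvN : (j+1) % n > (j+1) / n → 1 ≤ (j+1) / n → num = (j+1) % n := by
            rcases hsucc with ⟨h1, h2, h3⟩ | ⟨h1, h2, h3⟩ <;> rw [h1, h2] <;> intro hgt hge <;> omega
          have hval : j + 1 = max (j / n) (j % n) + 1 := by rw [h0] at hdm; omega
          rw [ih (j+1) num (tmp ++ [j + 1]) hfuel (by omega) hinvN, ← hval]
          simp
        · rw [if_neg h0]
          by_cases hlast : j / n = n - 1
          · rw [if_pos hlast]
            have hinvN : (j+1) % n > (j+1) / n → 1 ≤ (j+1) / n → num = (j+1) % n := by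
              rcases hsucc with ⟨h1, h2, h3⟩ | ⟨h1, h2, h3⟩ <;> rw [h1, h2] <;> intro hgt hge <;> omega
            have hval : n = max (j / n) (j % n) + 1 := by omega
            rw [ih (j+1) num (tmp ++ [n]) hfuel (by omega) hinvN, ← hval]
            simp
          · rw [if_neg hlast]
            by_cases hmid : j % n > j / n
            · rw [if_pos hmid]
              have hnum : num = j % n := hinv hmid (by omega)
              have hval : max num (j / n + 1) + 1 = max (j / n) (j % n) + 1 := by omega
              have hinvN : (j+1) % n > (j+1) / n → 1 ≤ (j+1) / n →
                  max (j / n) (j % n) + 1 = (j+1) % n := by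
                rcases hsucc with ⟨h1, h2, h3⟩ | ⟨h1, h2, h3⟩ <;> rw [h1, h2] <;> intro hgt hge <;> omega
              rw [hval, ih (j+1) _ (tmp ++ [max (j / n) (j % n) + 1]) hfuel (by omega) hinvN]
              simp
            · rw [if_neg hmid]
              have hval : j / n + 1 = max (j / n) (j % n) + 1 := by omega
              have hinvN : (j+1) % n > (j+1) / n → 1 ≤ (j+1) / n →
                  max (j / n) (j % n) + 1 = (j+1) % n := by
                rcases hsucc with ⟨h1, h2, h3⟩ | ⟨h1, h2, h3⟩ <;> rw [h1, h2] <;> intro hgt hge <;> omega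
              rw [hval, ih (j+1) _ (tmp ++ [max (j / n) (j % n) + 1]) hfuel (by omega) hinvN]
              simp
    · rw [solutionLoop, dif_neg hjb, pyRange_nil j _ (by omega)]
      simp

lemma solution_eq_alt (n left right : Int) (hn : 1 ≤ n) (hl : 0 ≤ left) :
    solution n left right = solution_alt n left right := by
  have hnpos : 0 < n := hn
  unfold solution solution_alt
  simp only [PySem.Int.mod_eq_emod_of_pos hnpos, PySem.Int.floordiv_eq_ediv_of_pos hnpos]
  have hdm := Int.mul_ediv_add_emod left n
  have hm0 : 0 ≤ left % n := Int.emod_nonneg left (by omega)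
  have hr0 : 0 ≤ left / n := Int.ediv_nonneg hl (by omega)
  have hprod : 0 ≤ n * (left / n) := mul_nonneg (by omega) hr0
  have hs0 : 0 ≤ left - left % n := by omega
  have hsd := divmod_char n (left / n) 0 hnpos le_rfl hnpos
  have hs : left - left % n = n * (left / n) + 0 := by omega
  have hinv : (left - left % n) % n > (left - left % n) / n → 1 ≤ (left - left % n) / n →
      (0 : Int) = (left - left % n) % n := by
    rw [hs, hsd.1, hsd.2]; intro hgt hge; omega
  rw [loop_eq n right hnpos ((n ^ 2 - (left - left % n)).toNat) _ 0 [] le_rfl hs0 hinv,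
      List.nil_append, PySem.List.slice_from _ hm0, pyRange_filter_lt, ← List.map_drop,
      pyRange_drop]
  congr 2
  omega

-- ===== VERDICT (by name: the statement is the Claim_ definition above) =====
theorem solution_spec : Claim_equal_solution := by
  intro n left right _hdom hpre
  unfold Spec_solution
  exact solution_eq_alt n left right hpre.1 hpre.2
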